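-- pv_equiv track=rewrite | github.com/ellismckenzielee/codewars-python | switch_on_the_gravity.py | switch_gravity
-- ===== SOURCE A (Python) =====
-- def switch_gravity(lst):
--     col_items = []
--     gravity_lst = [[] for row in lst]
--     for column_indx in range(len(lst[0])):
--         col_items.append([row[column_indx] for row in lst].count('#'))
--
--     for row_indx, row in enumerate(lst):
--         for column_indx, column in enumerate(row):
--             if row_indx >= len(lst) - col_items[column_indx]:
--                 gravity_lst[row_indx].append('#')
--             else:
--                 gravity_lst[row_indx].append('-')
--     return gravity_lst
-- ===== SOURCE B (Python) =====
-- def switch_gravity(lst):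
--     n = len(lst)
--     width = len(lst[0])
--     # per-column '#' counts via an explicit transpose
--     columns = [[row[c] for row in lst] for c in range(width)]
--     # rebuild each column dropped: blanks on top, '#' at the bottom
--     dropped = []
--     for col in columns:
--         cnt = col.count('#')
--         dropped.append(['-'] * (n - cnt) + ['#'] * cnt)
--     # reassemble row-major from the rebuilt columns
--     return [[dropped[c][r] for c in range(width)] for r in range(n)]
-- ===== Notes on version B (the rewrite author's own statement) =====
-- stated objective: alternative
-- what changed: B works column-wise: it transposes the grid, rebuilds each gravity-dropped column directly from its '#' count as '-'*(n-cnt)+'#'*cnt, and reassembles rows from the rebuilt columns, instead of A's per-cell row-index comparison against a count table.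
import Mathlib
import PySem

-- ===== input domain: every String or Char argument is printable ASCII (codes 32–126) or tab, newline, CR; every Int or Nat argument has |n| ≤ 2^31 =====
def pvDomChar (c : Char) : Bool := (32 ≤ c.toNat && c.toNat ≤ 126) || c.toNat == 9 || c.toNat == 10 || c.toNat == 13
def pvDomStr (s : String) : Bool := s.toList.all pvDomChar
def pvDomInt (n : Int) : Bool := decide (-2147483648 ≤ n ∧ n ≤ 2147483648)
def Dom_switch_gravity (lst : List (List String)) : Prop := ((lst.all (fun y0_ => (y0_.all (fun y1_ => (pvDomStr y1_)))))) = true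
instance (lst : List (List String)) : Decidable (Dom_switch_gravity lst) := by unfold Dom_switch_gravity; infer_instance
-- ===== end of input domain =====

-- B rebuilds each gravity-dropped column from its '#' count and reassembles the rows (alternative decomposition, same cost).
-- ===== PORT A =====
-- literal port of A: per-column '#' counts, then a per-cell row-index comparison
def switch_gravity (lst : List (List String)) : List (List String) :=
  let col_items : List Nat :=
    (List.range (lst.headD []).length).map
      (fun (c : Nat) => (lst.map (fun row => (PySem.List.pyGet? row (c : Int)).getD "")).count "#")
  (PySem.List.enumerate lst).map (fun p =>
    (PySem.List.enumerate p.2).map (fun q =>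
      if p.1 ≥ (lst.length : Int) - (col_items.getD q.1.toNat 0 : Nat) then "#" else "-"))

-- ===== PORT B =====
-- literal port of B: transpose, rebuild each column as '-'*(n-cnt) ++ '#'*cnt, read back row-major
def switch_gravity_alt (lst : List (List String)) : List (List String) :=
  let n := lst.length
  let width := (lst.headD []).length
  let columns : List (List String) :=
    (List.range width).map (fun (c : Nat) => lst.map (fun row => (PySem.List.pyGet? row (c : Int)).getD ""))
  let dropped : List (List String) :=
    columns.map (fun col =>
      let cnt := col.count "#"
      List.replicate (n - cnt) "-" ++ List.replicate cnt "#")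
  (List.range n).map (fun r => (List.range width).map (fun c => ((dropped.getD c []).getD r "")))

-- ===== PRECONDITION & SPEC =====
-- Pre_ excludes exactly the inputs on which Python A raises: the empty grid (lst[0] IndexError)
-- and ragged grids (a row shorter or longer than row 0 gives an IndexError in A's loops).
def Pre_switch_gravity (lst : List (List String)) : Prop :=
  lst ≠ [] ∧ ∀ row ∈ lst, row.length = (lst.headD []).length
instance (lst : List (List String)) : Decidable (Pre_switch_gravity lst) := by
  unfold Pre_switch_gravity; infer_instance
def pvWitness_switch_gravity : List (List String) := [["#", "-"], ["-", "#"]]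
def Spec_switch_gravity (lst : List (List String)) (out : List (List String)) : Prop := out = switch_gravity_alt lst
instance (lst : List (List String)) (out : List (List String)) : Decidable (Spec_switch_gravity lst out) := by unfold Spec_switch_gravity; infer_instance

-- ===== CLAIM (what is proved, stated in full; the proofs are below) =====
def Claim_equal_switch_gravity : Prop := ∀ (lst : List (List String)), Dom_switch_gravity lst → Pre_switch_gravity lst → Spec_switch_gravity lst (switch_gravity lst)

-- ===== LEMMAS AND PROOFS =====
theorem switch_gravity_eq (lst : List (List String)) (hp : Pre_switch_gravity lst) :
    switch_gravity lst = switch_gravity_alt lst := by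
  obtain ⟨hne, hrect⟩ := hp
  unfold switch_gravity switch_gravity_alt
  apply List.ext_getElem
  · simp [PySem.List.length_enumerate]
  intro r h1 h2
  simp only [List.getElem_map, List.getElem_range, PySem.List.getElem_enumerate]
  have hr : r < lst.length := by
    simpa [PySem.List.length_enumerate] using h1
  have hlen : lst[r].length = (lst.headD []).length := hrect _ (List.getElem_mem hr)
  apply List.ext_getElem
  · simp [PySem.List.length_enumerate, hlen]
  intro c hc1 hc2
  have hc : c < (lst.headD []).length := by
    simpa [PySem.List.length_enumerate, hlen] using hc1
  simp only [List.getElem_map, List.getElem_range, PySem.List.getElem_enumerate]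
  have hcle : (List.count "#" (List.map (fun row => (PySem.List.pyGet? row (c : Int)).getD "") lst)) ≤ lst.length := by
    simpa using List.count_le_length (l := List.map (fun row => (PySem.List.pyGet? row (c : Int)).getD "") lst) (a := "#")
  simp only [show (0:Int) + (c:Int) = (c:Int) by ring, Int.toNat_natCast,
    List.getD_eq_getElem?_getD, List.getElem?_map, List.getElem?_range, hc,
    Option.map_some, Option.getD_some]
  set k := List.count "#" (List.map (fun row => (PySem.List.pyGet? row (c : Int)).getD "") lst) with hk
  rcases Nat.lt_or_ge r (lst.length - k) with h' | h'
  · rw [List.getElem?_append_left (by simpa using h'), List.getElem?_replicate_of_lt h', if_neg (by omega)]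
    simp
  · rw [List.getElem?_append_right (by simpa using h'), if_pos (by omega)]
    rw [List.length_replicate, List.getElem?_replicate_of_lt (by omega)]
    simp

-- ===== VERDICT (by name: the statement is the Claim_ definition above) =====
theorem switch_gravity_spec : Claim_equal_switch_gravity := by
  intro lst _ hp; exact switch_gravity_eq lst hp
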